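-- pv_equiv track=rewrite | github.com/A-J-C/Year-3-Dissertation | RSA/quadratic_sieve.py | quadRes
-- ===== SOURCE A (Python) =====
-- def quadRes(p, n):
--     """ returns True if n is a quadratic residue mod p """
--
--     lamb = 1
--     alpha = (n - 1) // 2
--     p = p % n
--
--     while alpha != 0:
--         if alpha % 2:
--             alpha -= 1
--             lamb = (lamb * p) % n
--         else:
--             p = (p ** 2) % n
--             alpha = alpha // 2
--
--     return lamb
-- ===== SOURCE B (Python) =====
-- def quadRes(p, n):
--     """ returns True if n is a quadratic residue mod p """
--     p %= n
--
--     def f(e):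
--         # top-down exponentiation by squaring: p**e mod n (bare 1 when e == 0)
--         if e == 0:
--             return 1
--         t = f(e // 2)
--         t = (t * t) % n
--         if e % 2:
--             t = (t * p) % n
--         return t
--
--     return f((n - 1) // 2)
-- ===== Notes on version B (the rewrite author's own statement) =====
-- stated objective: alternative
-- what changed: Replaces A's bottom-up loop that mutates a running base and accumulator (decrement-if-odd / square-base-if-even) with a top-down recursion that halves the exponent and squares the recursive result, multiplying in p once per odd bit.
import Mathlib
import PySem

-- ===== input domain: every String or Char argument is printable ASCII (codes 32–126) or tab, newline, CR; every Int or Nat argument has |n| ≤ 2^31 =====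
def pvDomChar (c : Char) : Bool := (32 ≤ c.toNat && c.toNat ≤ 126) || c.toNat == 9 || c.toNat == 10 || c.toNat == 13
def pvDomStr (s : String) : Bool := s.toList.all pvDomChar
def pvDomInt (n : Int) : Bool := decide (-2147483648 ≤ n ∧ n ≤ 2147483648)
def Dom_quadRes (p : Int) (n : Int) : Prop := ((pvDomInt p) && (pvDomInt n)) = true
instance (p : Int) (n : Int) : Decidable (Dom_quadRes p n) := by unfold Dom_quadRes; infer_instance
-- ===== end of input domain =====

-- B replaces A's bottom-up square-the-base loop with a top-down halve-the-exponent
-- recursion that squares the recursive result (alternative decomposition, same cost).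

-- ===== PORT A =====
-- A's while loop: if alpha odd, decrement alpha and fold p into lamb; else square p, halve alpha.
-- The 'alpha ≤ 0 then lamb' guard only makes the function total: Python diverges for alpha < 0 (outside Pre_).
def quadResLoop (lamb p alpha n : Int) : Int :=
  if _h : alpha ≤ 0 then lamb
  else if PySem.Int.mod alpha 2 ≠ 0 then
    quadResLoop (PySem.Int.mod (lamb * p) n) p (alpha - 1) n
  else
    quadResLoop lamb (PySem.Int.mod (p ^ 2) n) (PySem.Int.floordiv alpha 2) n
termination_by alpha.toNat
decreasing_by
  · omega
  · rw [PySem.Int.floordiv_eq_ediv_of_pos (by norm_num)]; omega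

def quadRes (p : Int) (n : Int) : Int :=
  quadResLoop 1 (PySem.Int.mod p n) (PySem.Int.floordiv (n - 1) 2) n

-- ===== PORT B =====
-- B's recursive helper f(e): 1 at e = 0, else square f(e//2) mod n, times p mod n when e is odd.
-- The 'e ≤ 0 then 1' guard only makes the function total: Python's f recurses forever for e < 0 (outside Pre_).
def quadResPow (p n e : Int) : Int :=
  if _h : e ≤ 0 then 1
  else
    let t := quadResPow p n (PySem.Int.floordiv e 2)
    let t2 := PySem.Int.mod (t * t) n
    if PySem.Int.mod e 2 ≠ 0 then PySem.Int.mod (t2 * p) n else t2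
termination_by e.toNat
decreasing_by
  rw [PySem.Int.floordiv_eq_ediv_of_pos (by norm_num)]; omega

def quadRes_alt (p : Int) (n : Int) : Int :=
  quadResPow (PySem.Int.mod p n) n (PySem.Int.floordiv (n - 1) 2)

-- ===== PRECONDITION & SPEC =====
-- Pre_ excludes n ≤ 0: at n = 0 A raises ZeroDivisionError, and for n < 0 A's loop never terminates.
def Pre_quadRes (p : Int) (n : Int) : Prop := 1 ≤ n
instance (p : Int) (n : Int) : Decidable (Pre_quadRes p n) := by unfold Pre_quadRes; infer_instance
def pvWitness_quadRes : Int × Int := (2, 7)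

def Spec_quadRes (p : Int) (n : Int) (out : Int) : Prop := out = quadRes_alt p n
instance (p : Int) (n : Int) (out : Int) : Decidable (Spec_quadRes p n out) := by unfold Spec_quadRes; infer_instance

-- ===== CLAIM (what is proved, stated in full; the proofs are below) =====
def Claim_equal_quadRes : Prop := ∀ (p : Int) (n : Int), Dom_quadRes p n → Pre_quadRes p n → Spec_quadRes p n (quadRes p n)

-- ===== LEMMAS AND PROOFS =====

-- Modular-arithmetic helpers shared by both loop characterisations.
theorem pvMulEmodLeft (n a b : Int) : (a % n) * b % n = a * b % n := by
  rw [Int.mul_emod, Int.emod_emod_of_dvd _ dvd_rfl, ← Int.mul_emod]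

theorem pvMulEmodRight (n a b : Int) : a * (b % n) % n = a * b % n := by
  rw [Int.mul_emod, Int.emod_emod_of_dvd _ dvd_rfl, ← Int.mul_emod]

theorem pvPowEmod (n b : Int) (k : Nat) : (b % n) ^ k % n = b ^ k % n := by
  induction k with
  | zero => simp
  | succ k ih =>
    rw [pow_succ, pow_succ, pvMulEmodRight]
    conv_lhs => rw [Int.mul_emod]
    rw [ih, ← Int.mul_emod]

theorem pvMulPowEmod (n a b : Int) (k : Nat) : a * (b % n) ^ k % n = a * b ^ k % n := by
  conv_lhs => rw [Int.mul_emod]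
  rw [pvPowEmod, ← Int.mul_emod]

-- A's loop computes lamb · p^alpha mod n (and returns lamb untouched when alpha = 0).
theorem quadResLoop_eq (n : Int) (hn : 0 < n) :
    ∀ (k : Nat) (lamb p alpha : Int), alpha.toNat = k → 0 ≤ alpha →
      quadResLoop lamb p alpha n = if alpha = 0 then lamb else (lamb * p ^ alpha.toNat) % n := by
  intro k
  induction k using Nat.strong_induction_on with
  | _ k ih =>
    intro lamb p alpha hk ha
    rw [quadResLoop]
    by_cases h0 : alpha ≤ 0
    · have : alpha = 0 := le_antisymm h0 ha
      simp [this]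
    · have hpos : 0 < alpha := lt_of_not_ge h0
      simp only [dif_neg h0, PySem.Int.mod_eq_emod_of_pos hn,
        PySem.Int.mod_eq_emod_of_pos (show (0:Int) < 2 by norm_num),
        PySem.Int.floordiv_eq_ediv_of_pos (show (0:Int) < 2 by norm_num)]
      by_cases hodd : alpha % 2 ≠ 0
      · simp only [if_pos hodd]
        rw [ih (alpha - 1).toNat (by omega) _ _ _ rfl (by omega)]
        have h1 : alpha.toNat = (alpha - 1).toNat + 1 := by omega
        rw [if_neg (by omega : ¬ alpha = 0), h1, pow_succ]
        by_cases hz : alpha - 1 = 0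
        · rw [if_pos hz, show (alpha - 1).toNat = 0 by omega, pow_zero, one_mul]
        · rw [if_neg hz, pvMulEmodLeft]
          ring_nf
      · simp only [if_neg hodd]
        have hodd' : alpha % 2 = 0 := by omega
        rw [ih (alpha / 2).toNat (by omega) _ _ _ rfl (by omega)]
        rw [if_neg (by omega : ¬ alpha / 2 = 0), if_neg (by omega : ¬ alpha = 0)]
        rw [pvMulPowEmod, ← pow_mul, show 2 * (alpha / 2).toNat = alpha.toNat by omega]

-- B's recursion computes p^e mod n (and returns the bare 1 when e = 0).
theorem quadResPow_eq (n : Int) (hn : 0 < n) :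
    ∀ (k : Nat) (p e : Int), e.toNat = k → 0 ≤ e →
      quadResPow p n e = if e = 0 then 1 else p ^ e.toNat % n := by
  intro k
  induction k using Nat.strong_induction_on with
  | _ k ih =>
    intro p e hk he
    rw [quadResPow]
    by_cases h0 : e ≤ 0
    · have : e = 0 := le_antisymm h0 he
      simp [this]
    · have hpos : 0 < e := lt_of_not_ge h0
      simp only [dif_neg h0, PySem.Int.mod_eq_emod_of_pos hn,
        PySem.Int.mod_eq_emod_of_pos (show (0:Int) < 2 by norm_num),
        PySem.Int.floordiv_eq_ediv_of_pos (show (0:Int) < 2 by norm_num)]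
      rw [ih (e / 2).toNat (by omega) _ _ rfl (by omega)]
      rw [if_neg (by omega : ¬ e = 0)]
      by_cases hz : e / 2 = 0
      · -- then e = 1: the odd branch fires
        have he1 : e = 1 := by omega
        rw [if_pos hz, if_pos (by omega : e % 2 ≠ 0)]
        rw [mul_one, pvMulEmodLeft, one_mul, he1]
        norm_num
      · rw [if_neg hz]
        have hmul : p ^ (e / 2).toNat % n * (p ^ (e / 2).toNat % n) % n
            = p ^ ((e / 2).toNat + (e / 2).toNat) % n := by
          rw [pvMulEmodLeft, pvMulEmodRight, ← pow_add]
        by_cases hodd : e % 2 ≠ 0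
        · rw [if_pos hodd, hmul, pvMulEmodLeft, ← pow_succ,
            show (e / 2).toNat + (e / 2).toNat + 1 = e.toNat by omega]
        · have hodd' : e % 2 = 0 := by omega
          rw [if_neg (by simp [hodd']), hmul,
            show (e / 2).toNat + (e / 2).toNat = e.toNat by omega]

-- ===== VERDICT (by name: the statement is the Claim_ definition above) =====
theorem quadRes_spec : Claim_equal_quadRes := by
  intro p n _hd hpre
  unfold Spec_quadRes quadRes quadRes_alt
  have hn : 0 < n := hpre
  have he : 0 ≤ PySem.Int.floordiv (n - 1) 2 := by
    rw [PySem.Int.floordiv_eq_ediv_of_pos (by norm_num)]; omega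
  rw [quadResLoop_eq n hn _ _ _ _ rfl he, quadResPow_eq n hn _ _ _ rfl he]
  split
  · rfl
  · rw [one_mul]
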